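-- pv_equiv track=rewrite | github.com/josegerar/algorito_genetico_aaabbbaaabbb | funciones.py | mejor_individuo
-- ===== SOURCE A (Python) =====
-- def evaluar_individuo(individuo, modelo):
--     """comparamos cuanto se parace el individuo actual al del modelo"""
--     res = 0
--     for i in range(len(individuo)):
--         """si se parecen le damos un punto"""
--         if individuo[i] == modelo[i]:
--             res += 1
--     """puntos que obtubo el individuo"""
--     return res
--
-- def mejor_individuo(poblacion, modelo):
--     """escoge al mejor individuo de la poblacion"""
--     puntos_poblacion = [(evaluar_individuo(individuo=i, modelo=modelo), i) for i in poblacion]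
--
--     """ordena los individuos para que los mejores esten al principio"""
--     _mejores_puntuados = sorted(puntos_poblacion, key=lambda individuo: individuo[0], reverse=True)
--
--     """el individuo en la primera posicion sera el mejor de esa poblacion"""
--     _mejor = _mejores_puntuados[0]
--
--     """retornamos al mejor individuo"""
--     return _mejor[1]
-- ===== SOURCE B (Python) =====
-- def _puntuacion(individuo, modelo):
--     """score = number of positions where the individual matches the model"""
--     return sum(a == b for a, b in zip(individuo, modelo))
--
--
-- def mejor_individuo(poblacion, modelo):
--     """single linear pass keeping the first individual with the highest score
--     (no sort: one pass keeping the first strict maximum; raises IndexError on an empty population like A)"""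
--     mejor = poblacion[0]
--     mejor_puntos = _puntuacion(mejor, modelo)
--     for individuo in poblacion[1:]:
--         puntos = _puntuacion(individuo, modelo)
--         if puntos > mejor_puntos:
--             mejor, mejor_puntos = individuo, puntos
--     return mejor
-- ===== Notes on version B (the rewrite author's own statement) =====
-- stated objective: alternative
-- what changed: Replaces build-score-list + stable reverse sort + take-first with a single linear pass that keeps the first individual whose score is strictly maximal (zip-based scoring instead of an index loop).
import Mathlib
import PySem

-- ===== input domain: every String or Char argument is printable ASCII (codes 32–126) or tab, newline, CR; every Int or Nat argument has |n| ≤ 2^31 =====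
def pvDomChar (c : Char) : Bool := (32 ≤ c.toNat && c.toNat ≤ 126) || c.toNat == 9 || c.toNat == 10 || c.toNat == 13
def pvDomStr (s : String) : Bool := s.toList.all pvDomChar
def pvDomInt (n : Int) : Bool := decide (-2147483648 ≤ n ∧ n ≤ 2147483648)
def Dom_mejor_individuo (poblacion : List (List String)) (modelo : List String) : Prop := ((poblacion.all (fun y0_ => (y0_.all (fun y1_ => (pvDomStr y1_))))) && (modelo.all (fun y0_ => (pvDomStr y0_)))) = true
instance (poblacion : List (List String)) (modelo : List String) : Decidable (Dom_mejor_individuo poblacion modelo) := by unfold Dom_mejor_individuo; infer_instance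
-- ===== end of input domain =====

-- B replaces A's score-list + stable reverse sort + take-first with a single linear pass
-- keeping the first individual of strictly maximal score (objective: alternative algorithm).


-- ===== PORT A =====
def evaluar_individuo (individuo : List String) (modelo : List String) : Int :=
  (PySem.List.pyRange 0 (individuo.length : Int) 1).foldl
    (fun res i =>
      if PySem.List.pyGetD individuo i "" = PySem.List.pyGetD modelo i "" then res + 1 else res)
    0

def mejor_individuo (poblacion : List (List String)) (modelo : List String) : List String :=
  let puntos_poblacion := poblacion.map (fun i => (evaluar_individuo i modelo, i))
  let mejores_puntuados := PySem.List.sorted puntos_poblacion (fun p => p.1) true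
  let mejor := (PySem.List.pyGet? mejores_puntuados 0).getD ((0 : Int), [])
  mejor.2

-- ===== PORT B =====
def puntuacion (individuo : List String) (modelo : List String) : Int :=
  ((individuo.zip modelo).map (fun p => if p.1 = p.2 then (1 : Int) else 0)).sum

def mejor_individuo_alt (poblacion : List (List String)) (modelo : List String) : List String :=
  match poblacion with
  | [] => []   -- poblacion[0] raises IndexError in Python; excluded by Pre_
  | mejor :: resto =>
    (resto.foldl
      (fun acc individuo =>
        let puntos := puntuacion individuo modelo
        if acc.2 < puntos then (individuo, puntos) else acc)
      (mejor, puntuacion mejor modelo)).1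

-- ===== PRECONDITION & SPEC =====
-- A raises IndexError when poblacion is empty (sorted(...)[0]) or when some individual is
-- longer than modelo (evaluar_individuo reads modelo[i]); exactly those inputs are excluded.
def Pre_mejor_individuo (poblacion : List (List String)) (modelo : List String) : Prop :=
  poblacion ≠ [] ∧ ∀ ind ∈ poblacion, ind.length ≤ modelo.length

instance (poblacion : List (List String)) (modelo : List String) : Decidable (Pre_mejor_individuo poblacion modelo) := by unfold Pre_mejor_individuo; infer_instance

def pvWitness_mejor_individuo : List (List String) × List String :=
  ([["a", "b"], ["a", "x"]], ["a", "b"])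

def Spec_mejor_individuo (poblacion : List (List String)) (modelo : List String) (out : List String) : Prop := out = mejor_individuo_alt poblacion modelo
instance (poblacion : List (List String)) (modelo : List String) (out : List String) : Decidable (Spec_mejor_individuo poblacion modelo out) := by unfold Spec_mejor_individuo; infer_instance

-- ===== CLAIM (what is proved, stated in full; the proofs are below) =====
def Claim_equal_mejor_individuo : Prop := ∀ (poblacion : List (List String)) (modelo : List String), Dom_mejor_individuo poblacion modelo → Pre_mejor_individuo poblacion modelo → Spec_mejor_individuo poblacion modelo (mejor_individuo poblacion modelo)

-- ===== LEMMAS AND PROOFS =====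

-- A's index-loop score equals B's zip score when the individual is no longer than the model.
lemma score_aux (a b : List String) (h : a.length ≤ b.length) : ∀ (res : Int),
    (List.range a.length).foldl
      (fun r k => if a.getD k "" = b.getD k "" then r + 1 else r) res
    = res + ((a.zip b).map (fun p => if p.1 = p.2 then (1 : Int) else 0)).sum := by
  induction a generalizing b with
  | nil => simp
  | cons x t ih =>
    cases b with
    | nil => simp at h
    | cons y u =>
      intro res
      simp only [List.length_cons, List.range_succ_eq_map, List.foldl_cons, List.foldl_map,
        List.getD_cons_succ, List.getD_cons_zero, List.zip_cons_cons, List.map_cons,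
        List.sum_cons]
      rw [ih u (by simpa using h)]
      split <;> ring

lemma score_eq (ind modelo : List String) (h : ind.length ≤ modelo.length) :
    evaluar_individuo ind modelo = puntuacion ind modelo := by
  unfold evaluar_individuo puntuacion
  rw [PySem.List.pyRange_zero_natCast, List.foldl_map]
  simpa using score_aux ind modelo h 0

-- head of the stable reverse sort by first component = left fold keeping the first strict max
lemma sorted_rev_head (l : List (Int × List String)) (p0 : Int × List String) :
    (PySem.List.sorted (p0 :: l) (fun p => p.1) true).headD ((0 : Int), []) =
      l.foldl (fun b p => if b.1 < p.1 then p else b) p0 := by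
  induction l using List.reverseRecOn with
  | nil => simp [PySem.List.sorted_rev_eq_foldl_insertBy, PySem.List.insertBy]
  | append_singleton ys x ih =>
    have hrw : PySem.List.sorted (p0 :: (ys ++ [x])) (fun p => p.1) true
        = PySem.List.insertBy (fun a b => decide (b.1 < a.1)) x
            (PySem.List.sorted (p0 :: ys) (fun p => p.1) true) := by
      rw [PySem.List.sorted_rev_eq_foldl_insertBy, PySem.List.sorted_rev_eq_foldl_insertBy]
      simp
    have hne : PySem.List.sorted (p0 :: ys) (fun p => p.1) true ≠ [] := by
      simp [PySem.List.sorted_eq_nil_iff]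
    obtain ⟨m, tl, hm⟩ := List.exists_cons_of_ne_nil hne
    rw [hrw, hm]
    have hhead : m = ys.foldl (fun b p => if b.1 < p.1 then p else b) p0 := by
      simpa [hm] using ih
    simp only [PySem.List.insertBy, List.foldl_append, List.foldl_cons, List.foldl_nil]
    by_cases hlt : m.1 < x.1
    · simp [hlt, ← hhead]
    · simp [hlt, ← hhead]

-- B's fold carries (best, score best); A's head fold carries (score best, best): they are swaps.
lemma fold_swap (s : List String → Int) : ∀ (t : List (List String)) (b : List String),
    (t.foldl (fun acc x => if acc.1 < (s x, x).1 then (s x, x) else acc)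
        ((s b, b) : Int × List String)).2
    = (t.foldl (fun acc x => if acc.2 < s x then (x, s x) else acc) (b, s b)).1 := by
  intro t
  induction t with
  | nil => intro b; rfl
  | cons x t ih =>
    intro b
    by_cases h : s b < s x
    · simpa [h] using ih x
    · simpa [h] using ih b

theorem equal_main (poblacion : List (List String)) (modelo : List String)
    (hpre : Pre_mejor_individuo poblacion modelo) :
    mejor_individuo poblacion modelo = mejor_individuo_alt poblacion modelo := by
  obtain ⟨hne, hlen⟩ := hpre
  obtain ⟨h, t, rfl⟩ := List.exists_cons_of_ne_nil hne
  unfold mejor_individuo mejor_individuo_alt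
  simp only [List.map_cons]
  -- take the head of the sort via sorted_rev_head
  have hsne : PySem.List.sorted ((evaluar_individuo h modelo, h) ::
      t.map (fun i => (evaluar_individuo i modelo, i))) (fun p => p.1) true ≠ [] := by
    simp [PySem.List.sorted_eq_nil_iff]
  obtain ⟨m, tl, hm⟩ := List.exists_cons_of_ne_nil hsne
  have hget : (PySem.List.pyGet? (PySem.List.sorted ((evaluar_individuo h modelo, h) ::
      t.map (fun i => (evaluar_individuo i modelo, i))) (fun p => p.1) true) 0).getD ((0:Int), [])
      = m := by
    rw [hm]; simp [PySem.List.pyGet?, PySem.List.pyIdx?]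
  rw [hget]
  have hhd := sorted_rev_head (t.map (fun i => (evaluar_individuo i modelo, i)))
    (evaluar_individuo h modelo, h)
  rw [hm] at hhd
  simp only [List.headD_cons] at hhd
  subst hhd
  rw [List.foldl_map]
  -- replace evaluar_individuo by puntuacion everywhere (Pre_ gives the length bound)
  have hsh : evaluar_individuo h modelo = puntuacion h modelo :=
    score_eq h modelo (hlen h (by simp))
  have hcongr : t.foldl (fun b i => if b.1 < (evaluar_individuo i modelo, i).1 then
        (evaluar_individuo i modelo, i) else b) (evaluar_individuo h modelo, h)
      = t.foldl (fun b i => if b.1 < (puntuacion i modelo, i).1 then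
        (puntuacion i modelo, i) else b) (puntuacion h modelo, h) := by
    rw [hsh]
    apply PySem.List.foldl_congr_mem
    intro acc x hx
    rw [score_eq x modelo (hlen x (by simp [hx]))]
  rw [hcongr]
  exact fold_swap (fun i => puntuacion i modelo) t h

-- ===== VERDICT (by name: the statement is the Claim_ definition above) =====
theorem mejor_individuo_spec : Claim_equal_mejor_individuo := by
  intro poblacion modelo _ hpre
  unfold Spec_mejor_individuo
  exact equal_main poblacion modelo hpre
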